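-- pv_equiv track=rewrite | github.com/uclaml/COPS | alfworld/alfworld_trial.py | enumerate_splits
-- ===== SOURCE A (Python) =====
-- def enumerate_splits(string):
--     lines = [line for line in string.split("\n") if line]
--     result = []
--
--     for i in range(len(lines) - 1):
--         first_part = "\n".join(lines[: i + 1])
--         second_part = "\n".join(lines[i + 1 :])
--         result.append((first_part, second_part))
--
--     return result
-- ===== SOURCE B (Python) =====
-- def _splits(lines):
--     if len(lines) < 2:
--         return []
--     head, rest = lines[0], lines[1:]
--     out = [(head, "\n".join(rest))]
--     for p, s in _splits(rest):
--         out.append((head + "\n" + p, s))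
--     return out
--
--
-- def enumerate_splits(string):
--     lines = [line for line in string.split("\n") if line]
--     return _splits(lines)
-- ===== Notes on version B (the rewrite author's own statement) =====
-- stated objective: alternative
-- what changed: Replaces A's index loop that re-joins a growing prefix and a shrinking suffix at each iteration with a structural recursion on the line list that builds each level's pairs from the recursive result of the tail.
import Mathlib
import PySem

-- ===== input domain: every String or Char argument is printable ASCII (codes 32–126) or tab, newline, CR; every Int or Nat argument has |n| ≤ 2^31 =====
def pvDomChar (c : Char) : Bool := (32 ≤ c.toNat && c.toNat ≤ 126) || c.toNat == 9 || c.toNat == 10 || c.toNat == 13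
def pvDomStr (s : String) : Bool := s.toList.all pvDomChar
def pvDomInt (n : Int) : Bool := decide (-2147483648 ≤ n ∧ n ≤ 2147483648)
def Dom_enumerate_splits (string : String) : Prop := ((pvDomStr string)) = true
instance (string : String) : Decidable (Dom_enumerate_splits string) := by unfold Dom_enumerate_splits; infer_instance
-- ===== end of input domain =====

-- B replaces A's per-index loop (which re-joins a growing prefix and shrinking suffix at every
-- iteration) by a structural recursion on the line list that reuses the recursive result;
-- objective: alternative decomposition.

-- ===== PORT A =====
def enumerate_splits (string : String) : List (String × String) :=
  -- lines = [line for line in string.split("\n") if line]   (sep "\n" ≠ "", so split? is some)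
  let lines := ((PySem.Str.split? string "\n").getD []).filter (fun line => line ≠ "")
  let result : List (String × String) := []
  -- for i in range(len(lines) - 1): result.append((join(lines[:i+1]), join(lines[i+1:])))
  (PySem.List.pyRange 0 ((lines.length : Int) - 1) 1).foldl
    (fun result i =>
      let first_part := PySem.Str.join "\n" (PySem.List.slice lines none (some (i + 1)))
      let second_part := PySem.Str.join "\n" (PySem.List.slice lines (some (i + 1)) none)
      result ++ [(first_part, second_part)]) result

-- ===== PORT B =====
-- _splits(lines): recursion on the head of the line list
def pvSplits : List String → List (String × String)
  | [] => []
  | [_] => []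
  | head :: next :: rest =>
    (head, PySem.Str.join "\n" (next :: rest)) ::
      (pvSplits (next :: rest)).map (fun p => (head ++ "\n" ++ p.1, p.2))

def enumerate_splits_alt (string : String) : List (String × String) :=
  let lines := ((PySem.Str.split? string "\n").getD []).filter (fun line => line ≠ "")
  pvSplits lines

-- ===== PRECONDITION & SPEC =====
def Spec_enumerate_splits (string : String) (out : List (String × String)) : Prop := out = enumerate_splits_alt string
instance (string : String) (out : List (String × String)) : Decidable (Spec_enumerate_splits string out) := by unfold Spec_enumerate_splits; infer_instance

-- ===== CLAIM (what is proved, stated in full; the proofs are below) =====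
def Claim_equal_enumerate_splits : Prop := ∀ (string : String), Dom_enumerate_splits string → Spec_enumerate_splits string (enumerate_splits string)

-- ===== LEMMAS AND PROOFS =====

-- Str-level versions of the Chars join lemmas
theorem pvStrJoin_singleton (sep p : String) : PySem.Str.join sep [p] = p := by
  have h : (PySem.Str.join sep [p]).toList = p.toList := by
    simp [PySem.Str.toList_join, PySem.Chars.join_singleton]
  exact String.ext (by simp [h])

theorem pvStrJoin_cons_cons (sep p q : String) (rest : List String) :
    PySem.Str.join sep (p :: q :: rest) = p ++ sep ++ PySem.Str.join sep (q :: rest) := by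
  have h : (PySem.Str.join sep (p :: q :: rest)).toList
      = (p ++ sep ++ PySem.Str.join sep (q :: rest)).toList := by
    simp [PySem.Str.toList_join, PySem.Chars.join_cons_cons]
  exact String.ext (by simpa using h)

-- appending singletons in a fold is mapping
theorem pvFoldlApp {α β : Type} (f : α → β) (l : List α) (init : List β) :
    l.foldl (fun acc i => acc ++ [f i]) init = init ++ l.map f := by
  induction l generalizing init with
  | nil => simp
  | cons a l ih => simp [List.foldl_cons, ih]

-- B's recursion computes exactly the (prefix-join, suffix-join) table
theorem pvSplits_spec (lines : List String) :
    pvSplits lines = (List.range (lines.length - 1)).map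
      (fun k => (PySem.Str.join "\n" (lines.take (k + 1)),
                 PySem.Str.join "\n" (lines.drop (k + 1)))) := by
  induction lines with
  | nil => simp [pvSplits]
  | cons l rest ih =>
    cases rest with
    | nil => simp [pvSplits]
    | cons r rs =>
      show pvSplits (l :: r :: rs) = _
      rw [pvSplits, ih]
      have hlen : (l :: r :: rs).length - 1 = rs.length + 1 := by simp
      rw [hlen, List.range_succ_eq_map]
      simp only [List.map_cons, List.map_map]
      congr 1
      · -- head element
        simp [pvStrJoin_singleton]
      · -- tails: pointwise equal functions over the range
        apply List.map_congr_left
        intro k _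
        simp only [Function.comp, Nat.succ_eq_add_one]
        have htake : (l :: r :: rs).take (k + 1 + 1) = l :: (r :: rs).take (k + 1) := by
          simp [List.take_succ_cons]
        have hdrop : (l :: r :: rs).drop (k + 1 + 1) = (r :: rs).drop (k + 1) := by
          simp
        rw [htake, hdrop, List.take_succ_cons, pvStrJoin_cons_cons]

-- A's indexed loop computes the same table
theorem pvA_spec (lines : List String) :
    (PySem.List.pyRange 0 ((lines.length : Int) - 1) 1).foldl
      (fun result i =>
        result ++ [(PySem.Str.join "\n" (PySem.List.slice lines none (some (i + 1))),
                    PySem.Str.join "\n" (PySem.List.slice lines (some (i + 1)) none))])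
      ([] : List (String × String))
    = (List.range (lines.length - 1)).map
      (fun k => (PySem.Str.join "\n" (lines.take (k + 1)),
                 PySem.Str.join "\n" (lines.drop (k + 1)))) := by
  rw [pvFoldlApp
    (fun i : Int => (PySem.Str.join "\n" (PySem.List.slice lines none (some (i + 1))),
                     PySem.Str.join "\n" (PySem.List.slice lines (some (i + 1)) none)))]
  rw [PySem.List.pyRange_one, List.map_map]
  have hnat : ((lines.length : Int) - 1 - 0).toNat = lines.length - 1 := by omega
  rw [hnat]
  apply List.map_congr_left
  intro k _
  simp only [Function.comp]
  have h1 : (0 : Int) + (k : Int) + 1 = ((k + 1 : Nat) : Int) := by push_cast; ring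
  rw [h1, PySem.List.slice_to lines (by positivity), PySem.List.slice_from lines (by positivity)]
  simp

-- ===== VERDICT (by name: the statement is the Claim_ definition above) =====
theorem enumerate_splits_spec : Claim_equal_enumerate_splits := by
  intro string _
  show enumerate_splits string = enumerate_splits_alt string
  unfold enumerate_splits enumerate_splits_alt
  rw [pvA_spec, pvSplits_spec]
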